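-- pv_equiv track=rewrite | github.com/beyondExp/bbot-r3m | scripts/distill_adapter_hf_to_r3m.py | _strip_prompt_echo
-- ===== SOURCE A (Python) =====
-- def _strip_prompt_echo(user_prompt: str, answer: str) -> str:
--     u = (user_prompt or "").strip()
--     a = (answer or "").lstrip()
--     if not u or not a:
--         return a.strip()
--     u_low = u.lower()
--     a_low = a.lower()
--     # Drop echoed first line
--     if "\n" in a:
--         first, rest = a.split("\n", 1)
--         first_s = first.strip()
--         if 0 < len(first_s) <= 80 and first_s.lower() in u_low and ("?" in first_s or first_s.endswith("?")):
--             a = rest.lstrip()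
--             a_low = a.lower()
--     # Strip longest prefix of answer that appears in prompt
--     max_k = min(120, len(a_low))
--     for k in range(max_k, 17, -1):
--         pref = a_low[:k]
--         if pref and pref in u_low:
--             a = a[k:].lstrip(" \t\n:,-")
--             return a.strip()
--     return a.strip()
-- ===== SOURCE B (Python) =====
-- def _strip_prompt_echo(user_prompt: str, answer: str) -> str:
--     u = (user_prompt or "").strip()
--     a = (answer or "").lstrip()
--     if not u or not a:
--         return a.strip()
--     u_low = u.lower()
--     a_low = a.lower()
--     # Drop echoed first line
--     if "\n" in a:
--         first, rest = a.split("\n", 1)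
--         first_s = first.strip()
--         if 0 < len(first_s) <= 80 and first_s.lower() in u_low and ("?" in first_s or first_s.endswith("?")):
--             a = rest.lstrip()
--             a_low = a.lower()
--     # Binary-search the longest prefix of the answer that appears in the prompt:
--     # 'a_low[:k] in u_low' is monotone in k (a prefix of an occurring string occurs).
--     max_k = min(120, len(a_low))
--     if max_k < 18 or a_low[:18] not in u_low:
--         return a.strip()
--     lo, hi = 18, max_k  # invariant: a_low[:lo] in u_low, no k > hi works
--     while lo < hi:
--         mid = (lo + hi + 1) // 2
--         if a_low[:mid] in u_low:
--             lo = mid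
--         else:
--             hi = mid - 1
--     return a[lo:].lstrip(" \t\n:,-").strip()
-- ===== Notes on version B (the rewrite author's own statement) =====
-- stated objective: faster
-- what changed: The descending linear scan over candidate prefix lengths k=120..18 is replaced by a binary search for the largest k with a_low[:k] in u_low, exploiting that substring containment of a prefix is monotone in its length.
import Mathlib
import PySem

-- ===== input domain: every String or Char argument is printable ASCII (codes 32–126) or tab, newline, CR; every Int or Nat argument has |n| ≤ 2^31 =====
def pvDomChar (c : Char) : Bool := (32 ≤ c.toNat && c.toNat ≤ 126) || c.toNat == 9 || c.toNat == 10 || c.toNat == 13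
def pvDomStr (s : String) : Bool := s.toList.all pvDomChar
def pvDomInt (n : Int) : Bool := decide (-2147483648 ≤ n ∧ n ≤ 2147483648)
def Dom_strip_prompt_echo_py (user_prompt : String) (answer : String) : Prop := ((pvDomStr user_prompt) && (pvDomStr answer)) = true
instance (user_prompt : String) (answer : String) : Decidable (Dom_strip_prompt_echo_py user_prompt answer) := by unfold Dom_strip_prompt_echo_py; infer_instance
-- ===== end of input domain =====

-- B replaces A's descending linear scan over prefix lengths by a binary search
-- (containment of a prefix in the prompt is monotone in its length); objective: faster.

-- shared helpers (identical lines in both Pythons):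
-- Python s.lstrip(chars): drop leading code points that are in chars — exact.
def pvLstripChars (s : String) (chars : List Char) : String :=
  String.ofList (s.toList.dropWhile (fun c => chars.contains c))

def pvStripSet : List Char := [' ', '\t', '\n', ':', ',', '-']

-- the normalization + echoed first-line drop common to both Pythons;
-- none = the early `return a.strip()` (empty prompt or answer)
def pvEchoNorm (user_prompt : String) (answer : String) : Option (String × String) :=
  let u := PySem.Str.strip user_prompt
  let a := PySem.Str.lstrip answer
  if u = "" ∨ a = "" then none
  else
    let u_low := PySem.Str.lower u
    let a :=
      if PySem.Str.isIn "\n" a then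
        match PySem.Str.splitMax? a "\n" 1 with
        | some (first :: rest :: _) =>
          let first_s := PySem.Str.strip first
          if 0 < PySem.Str.len first_s ∧ PySem.Str.len first_s ≤ 80
              ∧ PySem.Str.isIn (PySem.Str.lower first_s) u_low
              ∧ (PySem.Str.isIn "?" first_s ∨ PySem.Str.endswith first_s "?") then
            PySem.Str.lstrip rest
          else a
        | _ => a
      else a
    some (a, u_low)

-- ===== PORT A =====
-- A's for-loop: k = max_k, max_k-1, …, 18, returning at the first matching prefix
def pvScanDesc (a : String) (a_low : String) (u_low : String) (k : Nat) : String :=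
  if k < 18 then PySem.Str.strip a
  else
    let pref := PySem.Str.slice a_low none (some (k : Int))
    if pref ≠ "" ∧ PySem.Str.isIn pref u_low then
      PySem.Str.strip (pvLstripChars (PySem.Str.slice a (some (k : Int)) none) pvStripSet)
    else pvScanDesc a a_low u_low (k - 1)
  termination_by k
  decreasing_by omega

def strip_prompt_echo_py (user_prompt : String) (answer : String) : String :=
  match pvEchoNorm user_prompt answer with
  | none => PySem.Str.strip (PySem.Str.lstrip answer)
  | some (a, u_low) =>
    let a_low := PySem.Str.lower a
    -- len ≥ 0, so .toNat is exact; Nat counter for the loop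
    let max_k := (min 120 (PySem.Str.len a_low)).toNat
    pvScanDesc a a_low u_low max_k

-- ===== PORT B =====
-- B's while-loop: binary search for the largest k with a_low[:k] in u_low
def pvBsearch (a_low : String) (u_low : String) (lo : Nat) (hi : Nat) : Nat :=
  if lo < hi then
    if PySem.Str.isIn (PySem.Str.slice a_low none (some (((lo + hi + 1) / 2 : Nat) : Int))) u_low then
      pvBsearch a_low u_low ((lo + hi + 1) / 2) hi
    else pvBsearch a_low u_low lo ((lo + hi + 1) / 2 - 1)
  else lo
  termination_by hi - lo
  decreasing_by all_goals omega

def strip_prompt_echo_py_alt (user_prompt : String) (answer : String) : String :=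
  match pvEchoNorm user_prompt answer with
  | none => PySem.Str.strip (PySem.Str.lstrip answer)
  | some (a, u_low) =>
    let a_low := PySem.Str.lower a
    -- len ≥ 0, so .toNat is exact; Nat bound for the binary search
    let max_k := (min 120 (PySem.Str.len a_low)).toNat
    if max_k < 18 ∨ ¬ PySem.Str.isIn (PySem.Str.slice a_low none (some (18 : Int))) u_low then
      PySem.Str.strip a
    else
      let lo := pvBsearch a_low u_low 18 max_k
      PySem.Str.strip (pvLstripChars (PySem.Str.slice a (some (lo : Int)) none) pvStripSet)

-- ===== PRECONDITION & SPEC =====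
def Spec_strip_prompt_echo_py (user_prompt : String) (answer : String) (out : String) : Prop := out = strip_prompt_echo_py_alt user_prompt answer
instance (user_prompt : String) (answer : String) (out : String) : Decidable (Spec_strip_prompt_echo_py user_prompt answer out) := by unfold Spec_strip_prompt_echo_py; infer_instance

-- ===== CLAIM (what is proved, stated in full; the proofs are below) =====
def Claim_equal_strip_prompt_echo_py : Prop := ∀ (user_prompt : String) (answer : String), Dom_strip_prompt_echo_py user_prompt answer → Spec_strip_prompt_echo_py user_prompt answer (strip_prompt_echo_py user_prompt answer)

-- ===== LEMMAS AND PROOFS =====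

-- abbreviation used only in the proofs: "the k-prefix of a_low occurs in u_low"
theorem pvCharsSliceTo (l : List Char) (b : Nat) :
    PySem.Chars.slice l none (some (b : Int)) = l.take b := PySem.List.slice_to_natCast l b

def pvP (a_low u_low : String) (k : Nat) : Prop :=
  PySem.Str.isIn (PySem.Str.slice a_low none (some (k : Int))) u_low = true

theorem pvP_mono {a_low u_low : String} {j k : Nat} (hjk : j ≤ k)
    (hk : pvP a_low u_low k) : pvP a_low u_low j := by
  unfold pvP at *
  rw [PySem.Str.isIn_iff_infix] at hk ⊢
  rw [PySem.Str.toList_slice, pvCharsSliceTo] at hk ⊢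
  have hpre : (a_low.toList.take j) <+: (a_low.toList.take k) := by
    have := List.take_prefix j (a_low.toList.take k)
    rwa [List.take_take, Nat.min_eq_left hjk] at this
  exact hpre.isInfix.trans hk

theorem pvPref_ne {a_low : String} {k : Nat} (hk : 1 ≤ k) (ha : 1 ≤ a_low.toList.length) :
    PySem.Str.slice a_low none (some (k : Int)) ≠ "" := by
  intro h
  have : (PySem.Str.slice a_low none (some (k : Int))).toList = [] := by rw [h]; rfl
  rw [PySem.Str.toList_slice, pvCharsSliceTo, List.take_eq_nil_iff] at this
  rcases this with h1 | h2
  · omega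
  · rw [h2] at ha; simp at ha

theorem pvScanDesc_all_false {a a_low u_low : String} {m : Nat}
    (h : ∀ j, 18 ≤ j → j ≤ m → ¬ pvP a_low u_low j) :
    pvScanDesc a a_low u_low m = PySem.Str.strip a := by
  induction m using Nat.strong_induction_on with
  | _ m ih =>
    rw [pvScanDesc]
    by_cases hm : m < 18
    · simp [hm]
    · have hPm : ¬ pvP a_low u_low m := h m (by omega) le_rfl
      simp only [if_neg hm]
      rw [if_neg]
      · exact ih (m - 1) (by omega) (fun j h1 h2 => h j h1 (by omega))
      · rintro ⟨-, hin⟩; exact hPm hin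

theorem pvScanDesc_hit {a a_low u_low : String} {r m : Nat}
    (hr18 : 18 ≤ r) (hrm : r ≤ m) (ha : 18 ≤ a_low.toList.length)
    (hPr : pvP a_low u_low r)
    (habove : ∀ j, r < j → j ≤ m → ¬ pvP a_low u_low j) :
    pvScanDesc a a_low u_low m =
      PySem.Str.strip (pvLstripChars (PySem.Str.slice a (some (r : Int)) none) pvStripSet) := by
  induction m using Nat.strong_induction_on with
  | _ m ih =>
    rw [pvScanDesc]
    have hm : ¬ m < 18 := by omega
    simp only [if_neg hm]
    by_cases hmr : m = r
    · subst hmr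
      rw [if_pos]
      exact ⟨pvPref_ne (by omega) (by omega), hPr⟩
    · have hPm : ¬ pvP a_low u_low m := habove m (by omega) le_rfl
      rw [if_neg]
      · exact ih (m - 1) (by omega) (by omega) (fun j h1 h2 => habove j h1 (by omega))
      · rintro ⟨-, hin⟩; exact hPm hin

theorem pvBsearch_spec {a_low u_low : String} (maxk : Nat) :
    ∀ n lo hi, hi - lo ≤ n → 18 ≤ lo → lo ≤ hi → hi ≤ maxk →
    pvP a_low u_low lo →
    (∀ j, hi < j → j ≤ maxk → ¬ pvP a_low u_low j) →
    18 ≤ pvBsearch a_low u_low lo hi ∧ pvBsearch a_low u_low lo hi ≤ hi ∧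
      pvP a_low u_low (pvBsearch a_low u_low lo hi) ∧
      (∀ j, pvBsearch a_low u_low lo hi < j → j ≤ maxk → ¬ pvP a_low u_low j) := by
  intro n
  induction n with
  | zero =>
    intro lo hi hn h18 hlh hhm hPlo habove
    have : lo = hi := by omega
    rw [pvBsearch, if_neg (by omega)]
    subst this
    exact ⟨h18, le_rfl, hPlo, habove⟩
  | succ n ih =>
    intro lo hi hn h18 hlh hhm hPlo habove
    rw [pvBsearch]
    by_cases hlt : lo < hi
    · simp only [if_pos hlt]
      by_cases hin : PySem.Str.isIn (PySem.Str.slice a_low none (some (((lo + hi + 1) / 2 : Nat) : Int))) u_low = true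
      · rw [if_pos hin]
        exact ih ((lo + hi + 1) / 2) hi (by omega) (by omega) (by omega) hhm hin habove
      · rw [if_neg hin]
        have hnew : ∀ j, (lo + hi + 1) / 2 - 1 < j → j ≤ maxk → ¬ pvP a_low u_low j := by
          intro j hj1 hj2
          by_cases hjhi : hi < j
          · exact habove j hjhi hj2
          · intro hPj
            exact hin (pvP_mono (by omega) hPj)
        obtain ⟨h1, h2, h3, h4⟩ := ih lo ((lo + hi + 1) / 2 - 1) (by omega) h18 (by omega) (by omega) hPlo hnew
        exact ⟨h1, by omega, h3, h4⟩
    · rw [if_neg hlt]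
      have : lo = hi := by omega
      subst this
      exact ⟨h18, le_rfl, hPlo, habove⟩

theorem pvTail_eq (a u_low : String) :
    (let a_low := PySem.Str.lower a
     let max_k := (min 120 (PySem.Str.len a_low)).toNat
     pvScanDesc a a_low u_low max_k) =
    (let a_low := PySem.Str.lower a
     let max_k := (min 120 (PySem.Str.len a_low)).toNat
     if max_k < 18 ∨ ¬ PySem.Str.isIn (PySem.Str.slice a_low none (some (18 : Int))) u_low then
       PySem.Str.strip a
     else
       let lo := pvBsearch a_low u_low 18 max_k
       PySem.Str.strip (pvLstripChars (PySem.Str.slice a (some (lo : Int)) none) pvStripSet)) := by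
  simp only
  set a_low := PySem.Str.lower a with ha_low
  set m := (min 120 (PySem.Str.len a_low)).toNat with hm
  have hlen : PySem.Str.len a_low = (a_low.toList.length : Int) := by
    simp [PySem.Str.len_eq]
  by_cases h18 : m < 18
  · rw [if_pos (Or.inl h18)]
    exact pvScanDesc_all_false (fun j h1 h2 => by omega)
  · by_cases hP18 : pvP a_low u_low 18
    · rw [if_neg]
      · have hlena : 18 ≤ a_low.toList.length := by
          rw [hlen] at hm; omega
        obtain ⟨hr18, hrm, hPr, habove⟩ :=
          pvBsearch_spec (a_low := a_low) (u_low := u_low) m (m - 18) 18 m (by omega)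
            le_rfl (by omega) le_rfl hP18 (fun j h1 h2 => by omega)
        exact pvScanDesc_hit hr18 hrm hlena hPr habove
      · rw [not_or]
        exact ⟨h18, by simpa [pvP] using hP18⟩
    · rw [if_pos (Or.inr (by simpa [pvP] using hP18))]
      exact pvScanDesc_all_false (fun j h1 h2 hPj => hP18 (pvP_mono (by omega) hPj))

-- ===== VERDICT (by name: the statement is the Claim_ definition above) =====
theorem strip_prompt_echo_py_spec : Claim_equal_strip_prompt_echo_py := by
  intro user_prompt answer _
  unfold Spec_strip_prompt_echo_py strip_prompt_echo_py strip_prompt_echo_py_alt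
  cases h : pvEchoNorm user_prompt answer with
  | none => rfl
  | some p =>
    obtain ⟨a, u_low⟩ := p
    exact pvTail_eq a u_low
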